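-- pv_equiv track=rewrite | github.com/roy-van-dijk/iscrip | assignments_3/doubledutch.py | vertaalWoord
-- ===== SOURCE A (Python) =====
-- def vertaalWoord(i, ii):
--     def capIfCap(cap, l):
--         return l.capitalize() if cap else l
--
--     new_word = ""
--     max_index = (len(i) - 1)
--     skips = []
--
--     for index, letter in enumerate(i):
--         cap = True if letter.isupper() else False
--
--         letter = letter.lower()
--
--         if index != max_index:
--             if letter == i[index+1].lower():
--                 if letter not in ii:
--                     new_word += (capIfCap(cap, "s") + "quat" + letter + "h")
--                     skips.append(index)
--                     skips.append(index+1)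
--                 else:
--                     new_word += (capIfCap(cap, "s") + "qua" + letter)
--                     skips.append(index)
--
--         if index not in skips:
--             if letter in ii:
--                 new_word += capIfCap(cap, ii[letter])
--             else:
--                 new_word += capIfCap(cap, letter)
--
--     return new_word
-- ===== SOURCE B (Python) =====
-- def vertaalWoord(i, ii):
--     def capIfCap(cap, l):
--         return l.capitalize() if cap else l
--
--     def piece(k, ch):
--         cap = ch.isupper()
--         letter = ch.lower()
--         pair = k + 1 < len(i) and letter == i[k + 1].lower()
--         out = ""
--         if pair:
--             out = capIfCap(cap, "s") + ("qua" + letter if letter in ii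
--                                         else "quat" + letter + "h")
--         skipped = pair or (k > 0 and i[k - 1].lower() == letter
--                            and i[k - 1].lower() not in ii)
--         if not skipped:
--             out += capIfCap(cap, ii[letter]) if letter in ii else capIfCap(cap, letter)
--         return out
--
--     return "".join(piece(k, ch) for k, ch in enumerate(i))
-- ===== Notes on version B (the rewrite author's own statement) =====
-- stated objective: faster
-- what changed: Drops A's stateful skips list and string concatenation: B computes for each index a stateless local skip condition (pair at k, or pair at k-1 with that letter not in the table) and joins independent per-index pieces.
import Mathlib
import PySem

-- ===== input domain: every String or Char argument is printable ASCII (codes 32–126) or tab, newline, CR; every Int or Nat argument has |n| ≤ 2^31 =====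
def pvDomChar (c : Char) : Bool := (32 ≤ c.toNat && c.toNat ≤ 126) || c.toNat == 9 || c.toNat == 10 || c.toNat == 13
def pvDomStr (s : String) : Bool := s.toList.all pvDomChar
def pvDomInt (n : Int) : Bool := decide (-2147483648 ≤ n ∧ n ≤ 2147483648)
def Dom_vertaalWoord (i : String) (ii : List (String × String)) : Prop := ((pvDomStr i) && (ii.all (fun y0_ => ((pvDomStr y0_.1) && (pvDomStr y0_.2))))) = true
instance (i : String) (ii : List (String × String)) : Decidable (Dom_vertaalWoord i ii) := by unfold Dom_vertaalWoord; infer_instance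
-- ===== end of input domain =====

-- B replaces A's stateful skips list and repeated string concatenation by a stateless
-- per-index skip condition and a join of independent per-index pieces (measured faster).

-- ===== PORT A =====
-- str.capitalize() (exact on ASCII: first char upper-cased, rest lower-cased)
def pyCapA (cs : List Char) : List Char :=
  match cs with
  | [] => []
  | c :: r => PySem.Chars.upperChar c :: r.map PySem.Chars.lowerChar

def capIfCapA (cap : Bool) (cs : List Char) : List Char :=
  if cap then pyCapA cs else cs

-- `letter in ii` / `ii[letter]` for the dict ii, letter a one-char string
def keyInA (ii : List (String × String)) (c : Char) : Bool :=
  ii.any (fun p => p.1 == String.ofList [c])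

def lookupA (ii : List (String × String)) (c : Char) : List Char :=
  (((ii.find? (fun p => p.1 == String.ofList [c])).map (·.2)).getD "").toList

-- the for-loop of A: state = (new_word, skips); rest = l.drop idx
def goA (l : List Char) (ii : List (String × String)) (idx : Nat)
    (rest : List Char) (acc : List Char) (skips : List Nat) : List Char :=
  match rest with
  | [] => acc
  | ch :: r =>
    let cap := PySem.Chars.isupper ch
    let letter := PySem.Chars.lowerChar ch
    let st :=
      if idx ≠ l.length - 1 then
        if letter == PySem.Chars.lowerChar ((PySem.List.pyGet? l ((idx : Int) + 1)).getD ' ') then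
          if ¬ keyInA ii letter = true then
            (acc ++ capIfCapA cap ['s'] ++ "quat".toList ++ [letter] ++ ['h'],
             skips ++ [idx, idx + 1])
          else
            (acc ++ capIfCapA cap ['s'] ++ "qua".toList ++ [letter], skips ++ [idx])
        else (acc, skips)
      else (acc, skips)
    let acc2 :=
      if idx ∉ st.2 then
        if keyInA ii letter then st.1 ++ capIfCapA cap (lookupA ii letter)
        else st.1 ++ capIfCapA cap [letter]
      else st.1
    goA l ii (idx + 1) r acc2 st.2

def vertaalWoord (i : String) (ii : List (String × String)) : String :=
  String.ofList (goA i.toList ii 0 i.toList [] [])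

-- ===== PORT B =====
def pyCapB (cs : List Char) : List Char :=
  match cs with
  | [] => []
  | c :: r => PySem.Chars.upperChar c :: r.map PySem.Chars.lowerChar

def capIfCapB (cap : Bool) (cs : List Char) : List Char :=
  if cap then pyCapB cs else cs

def keyInB (ii : List (String × String)) (c : Char) : Bool :=
  ii.any (fun p => p.1 == String.ofList [c])

def lookupB (ii : List (String × String)) (c : Char) : List Char :=
  (((ii.find? (fun p => p.1 == String.ofList [c])).map (·.2)).getD "").toList

-- `k + 1 < len(i) and letter == i[k+1].lower()`
def pairB (l : List Char) (k : Nat) (letter : Char) : Bool :=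
  decide (k + 1 < l.length) &&
    (match PySem.List.pyGet? l ((k : Int) + 1) with
     | some c => letter == PySem.Chars.lowerChar c
     | none => false)

-- `k > 0 and i[k-1].lower() == letter and i[k-1].lower() not in ii`
def lookbB (l : List Char) (ii : List (String × String)) (k : Nat) (letter : Char) : Bool :=
  decide (0 < k) &&
    (match PySem.List.pyGet? l ((k : Int) - 1) with
     | some p => (PySem.Chars.lowerChar p == letter) && ! keyInB ii (PySem.Chars.lowerChar p)
     | none => false)

def pieceB (l : List Char) (ii : List (String × String)) (k : Nat) (ch : Char) : List Char :=
  let cap := PySem.Chars.isupper ch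
  let letter := PySem.Chars.lowerChar ch
  let pair := pairB l k letter
  let out : List Char :=
    if pair then
      capIfCapB cap ['s'] ++
        (if keyInB ii letter then "qua".toList ++ [letter]
         else "quat".toList ++ [letter, 'h'])
    else []
  let skipped := pair || lookbB l ii k letter
  if ! skipped then
    out ++ (if keyInB ii letter then capIfCapB cap (lookupB ii letter)
            else capIfCapB cap [letter])
  else out

def goB (l : List Char) (ii : List (String × String)) (idx : Nat) (rest : List Char) : List Char :=
  match rest with
  | [] => []
  | ch :: r => pieceB l ii idx ch ++ goB l ii (idx + 1) r

def vertaalWoord_alt (i : String) (ii : List (String × String)) : String :=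
  String.ofList (goB i.toList ii 0 i.toList)

-- ===== PRECONDITION & SPEC =====
def Spec_vertaalWoord (i : String) (ii : List (String × String)) (out : String) : Prop := out = vertaalWoord_alt i ii
instance (i : String) (ii : List (String × String)) (out : String) : Decidable (Spec_vertaalWoord i ii out) := by unfold Spec_vertaalWoord; infer_instance

-- ===== CLAIM (what is proved, stated in full; the proofs are below) =====
def Claim_equal_vertaalWoord : Prop := ∀ (i : String) (ii : List (String × String)), Dom_vertaalWoord i ii → Spec_vertaalWoord i ii (vertaalWoord i ii)

-- ===== LEMMAS AND PROOFS =====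

-- the lookbehind condition as a function of l and k only (char at k read from l)
def lbool (l : List Char) (ii : List (String × String)) (k : Nat) : Bool :=
  match l[k]? with
  | some c => lookbB l ii k (PySem.Chars.lowerChar c)
  | none => false

theorem goA_eq_goB (l : List Char) (ii : List (String × String)) :
    ∀ (rest : List Char) (idx : Nat) (acc : List Char) (skips : List Nat),
      l.drop idx = rest →
      (∀ j ∈ skips, j ≤ idx) →
      ((idx ∈ skips) ↔ lbool l ii idx = true) →
      goA l ii idx rest acc skips = acc ++ goB l ii idx rest := by
  intro rest
  induction rest with
  | nil => intro idx acc skips _ _ _; simp [goA, goB]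
  | cons ch r ih =>
    intro idx acc skips hdrop hle hmem
    have hidx : l[idx]? = some ch := by
      have h := congrArg (fun t : List Char => t[0]?) hdrop
      simp only [List.getElem?_drop] at h
      simpa using h
    have hidxlt : idx < l.length := by
      by_contra h
      rw [List.getElem?_eq_none (by omega)] at hidx
      simp at hidx
    have hdrop' : l.drop (idx + 1) = r := by
      have h := congrArg (List.drop 1) hdrop
      rw [List.drop_drop] at h
      simpa using h
    have hget1 : PySem.List.pyGet? l ((idx : Int) + 1) = l[idx + 1]? := by
      have he : ((idx : Int) + 1) = ((idx + 1 : Nat) : Int) := by push_cast; ring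
      rw [he, PySem.List.pyGet?_natCast]
    have hgetp : PySem.List.pyGet? l (((idx + 1 : Nat) : Int) - 1) = l[idx]? := by
      have he : (((idx + 1 : Nat) : Int) - 1) = ((idx : Nat) : Int) := by push_cast; ring
      rw [he, PySem.List.pyGet?_natCast]
    have hlbself : lbool l ii idx = lookbB l ii idx (PySem.Chars.lowerChar ch) := by
      rw [lbool, hidx]
    rcases r with _ | ⟨c, r'⟩
    · -- idx is the last index
      have hlen : l.length = idx + 1 := by
        have h := congrArg List.length hdrop
        simp at h
        omega
      have hmax : ¬ idx ≠ l.length - 1 := by omega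
      have hpairB : pairB l idx (PySem.Chars.lowerChar ch) = false := by
        simp [pairB, hlen]
      rw [goA, goB, pieceB]
      simp only [hmax, if_false, hpairB, Bool.false_or]
      rw [goA]
      rw [goB]
      rw [← hlbself] at *
      rcases hsk : lbool l ii idx with _ | _
      · have hnotin : idx ∉ skips := by rw [hmem, hsk]; exact Bool.false_ne_true
        simp only [hnotin, not_false_iff, hsk, Bool.not_false, if_pos trivial]
        rcases hk : keyInA ii (PySem.Chars.lowerChar ch) with _ | _ <;>
          · have hk' : keyInB ii (PySem.Chars.lowerChar ch) = _ := hk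
            simp [hk, hk', capIfCapA, capIfCapB, lookupA, lookupB, pyCapA, pyCapB]
      · have hin : idx ∈ skips := hmem.mpr hsk
        simp [hin, hsk]
    · -- there is a next char c
      have hc : l[idx + 1]? = some c := by
        have h := congrArg (fun t : List Char => t[1]?) hdrop
        simp only [List.getElem?_drop] at h
        simpa using h
      obtain ⟨hlt1, hcv⟩ := List.getElem?_eq_some_iff.mp hc
      have hlen2 : idx + 1 < l.length := hlt1
      have hne : idx ≠ l.length - 1 := by omega
      have hpairB : pairB l idx (PySem.Chars.lowerChar ch)
          = (PySem.Chars.lowerChar ch == PySem.Chars.lowerChar c) := by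
        simp [pairB, hget1, hc, hlen2, hcv]
      have hlbnext : lbool l ii (idx + 1)
          = ((PySem.Chars.lowerChar ch == PySem.Chars.lowerChar c)
              && ! keyInB ii (PySem.Chars.lowerChar ch)) := by
        simp [lbool, hc, lookbB, hgetp, hidx]
      by_cases hpair : PySem.Chars.lowerChar ch = PySem.Chars.lowerChar c
      · -- adjacent pair at idx
        have hgd : (PySem.Chars.lowerChar ch
            == PySem.Chars.lowerChar ((PySem.List.pyGet? l ((idx : Int) + 1)).getD ' ')) = true := by
          rw [hget1, hc]; exact beq_iff_eq.mpr hpair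
        have hpairB' : pairB l idx (PySem.Chars.lowerChar ch) = true := by
          rw [hpairB]; exact beq_iff_eq.mpr hpair
        rcases hk : keyInA ii (PySem.Chars.lowerChar ch) with _ | _
        · -- letter not in ii: skips gains idx and idx + 1
          have hkB : keyInB ii (PySem.Chars.lowerChar ch) = false := hk
          rw [goA]
          simp only [if_pos hne, if_pos hgd]
          simp [hk]
          rw [ih (idx + 1) _ _ hdrop'
            (by intro j hj; simp at hj
                rcases hj with hj | hj | hj
                · exact Nat.le_succ_of_le (hle j hj)
                · omega
                · omega)
            (by rw [hlbnext]
                simp [hkB, beq_iff_eq.mpr hpair])]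
          simp [goB, pieceB, hpairB', hkB, capIfCapA, capIfCapB, pyCapA, pyCapB,
            lookupA, lookupB, List.append_assoc]
        · -- letter in ii: skips gains only idx
          have hkB : keyInB ii (PySem.Chars.lowerChar ch) = true := hk
          rw [goA]
          simp only [if_pos hne, if_pos hgd]
          simp [hk]
          rw [ih (idx + 1) _ _ hdrop'
            (by intro j hj; simp at hj
                rcases hj with hj | hj
                · exact Nat.le_succ_of_le (hle j hj)
                · omega)
            (by rw [hlbnext]
                simp [hkB]
                intro hcon
                exact absurd (hle _ hcon) (by omega))]
          simp [goB, pieceB, hpairB', hkB, capIfCapA, capIfCapB, pyCapA, pyCapB,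
            lookupA, lookupB, List.append_assoc]
      · -- no pair at idx
        have hgd : ¬ (PySem.Chars.lowerChar ch
            == PySem.Chars.lowerChar ((PySem.List.pyGet? l ((idx : Int) + 1)).getD ' ')) = true := by
          rw [hget1, hc]; simp [hpair]
        have hpairB' : pairB l idx (PySem.Chars.lowerChar ch) = false := by
          rw [hpairB]; exact beq_eq_false_iff_ne.mpr hpair
        rw [goA]
        simp only [if_pos hne, if_neg hgd]
        rw [ih (idx + 1) _ _ hdrop'
          (by intro j hj; exact Nat.le_succ_of_le (hle j hj))
          (by rw [hlbnext]
              simp [hpair]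
              intro hcon
              exact absurd (hle _ hcon) (by omega))]
        rcases hsk : lbool l ii idx with _ | _
        · have hnotin : idx ∉ skips := by rw [hmem, hsk]; exact Bool.false_ne_true
          have hlkb : lookbB l ii idx (PySem.Chars.lowerChar ch) = false := by
            rw [← hlbself]; exact hsk
          rcases hk : keyInA ii (PySem.Chars.lowerChar ch) with _ | _ <;>
            · have hk' : keyInB ii (PySem.Chars.lowerChar ch) = _ := hk
              simp [goB, pieceB, hpairB', hnotin, hlkb, hk, hk', capIfCapA, capIfCapB,
                lookupA, lookupB, pyCapA, pyCapB, List.append_assoc]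
        · have hin : idx ∈ skips := hmem.mpr hsk
          have hlkb : lookbB l ii idx (PySem.Chars.lowerChar ch) = true := by
            rw [← hlbself]; exact hsk
          simp [goB, pieceB, hpairB', hin, hlkb]

-- ===== VERDICT (by name: the statement is the Claim_ definition above) =====
theorem vertaalWoord_spec : Claim_equal_vertaalWoord := by
  intro i ii _
  unfold Spec_vertaalWoord vertaalWoord vertaalWoord_alt
  congr 1
  apply goA_eq_goB
  · simp
  · intro j hj; simp at hj
  · rw [lbool]
    cases i.toList[0]? <;> simp [lookbB]
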